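-- pv_equiv track=rewrite | github.com/ArturMkrt/advanced_python- | week1/homework1.py | mirror_string
-- ===== SOURCE A (Python) =====
-- def mirror_string(str):
--     temp = list(str)
--     for x in range(len(temp)):
--         if ord(temp[x]) in range(65,91):
--             temp[x] = chr(90-(ord(temp[x])-65))
--         elif ord(temp[x]) in range(97,123):
--             temp[x] = chr(122-(ord(temp[x])-97))
--     return "".join(temp)
-- ===== SOURCE B (Python) =====
-- def mirror_string(str):
--     src = "ABCDEFGHIJKLMNOPQRSTUVWXYZabcdefghijklmnopqrstuvwxyz"
--     dst = src[:26][::-1] + src[26:][::-1]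
--     return str.translate("".maketrans(src, dst))
-- ===== Notes on version B (the rewrite author's own statement) =====
-- stated objective: idiomatic
-- what changed: A walks the string by index, branching on two ord-range membership tests and rewriting list cells in place; B has no loop or branch at all: it builds one translation table with maketrans from the alphabet string and its two case-halves reversed by slicing, and returns str.translate(table) in a single call.
import Mathlib
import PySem

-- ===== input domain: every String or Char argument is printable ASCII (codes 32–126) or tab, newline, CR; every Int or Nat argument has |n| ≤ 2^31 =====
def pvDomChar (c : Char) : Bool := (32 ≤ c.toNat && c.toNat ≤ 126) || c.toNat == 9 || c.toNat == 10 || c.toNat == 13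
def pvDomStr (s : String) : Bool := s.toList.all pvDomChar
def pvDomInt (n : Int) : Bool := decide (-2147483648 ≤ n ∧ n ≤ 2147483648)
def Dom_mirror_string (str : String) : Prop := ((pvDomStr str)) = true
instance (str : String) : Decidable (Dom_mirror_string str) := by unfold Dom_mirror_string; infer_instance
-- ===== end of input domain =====

-- B replaces A's index loop with its two per-character ord-range branches by one maketrans
-- translation table (alphabet vs its two case-halves reversed by slicing) and a single translate call.

-- ===== PORT A =====
def mirror_string (str : String) : String :=
  let temp := str.toList
  let temp' := (PySem.List.pyRange 0 (PySem.List.len temp) 1).foldl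
    (fun temp x =>
      let o := (PySem.List.pyGetD temp x ' ').toNat
      if 65 ≤ o ∧ o < 91 then PySem.List.pySetD temp x (Char.ofNat (90 - (o - 65)))
      else if 97 ≤ o ∧ o < 123 then PySem.List.pySetD temp x (Char.ofNat (122 - (o - 97)))
      else temp)
    temp
  String.ofList temp'

-- ===== PORT B =====
-- "".maketrans(src, dst): the table from each char of src to the same-index char of dst.
-- Python keys the table by code points (ord c); ord is injective, so Char keys are exact here.
def pyMaketrans (src dst : List Char) : PySem.Dict Char Char :=
  (src.zip dst).foldl (fun d p => d.insert p.1 p.2) PySem.Dict.empty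

-- s.translate(table): each char replaced by its table entry, unchanged when absent (exact for
-- a maketrans table whose values are single characters, as here).
def pyTranslate (s : List Char) (t : PySem.Dict Char Char) : List Char :=
  s.map (fun c => t.getD c c)

def mirror_string_alt (str : String) : String :=
  let src := "ABCDEFGHIJKLMNOPQRSTUVWXYZabcdefghijklmnopqrstuvwxyz".toList
  let dst := ((PySem.List.slice? (PySem.List.slice src none (some 26)) none none (-1)).getD [])
          ++ ((PySem.List.slice? (PySem.List.slice src (some 26) none) none none (-1)).getD [])
  String.ofList (pyTranslate str.toList (pyMaketrans src dst))

-- ===== PRECONDITION & SPEC =====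
def Spec_mirror_string (str : String) (out : String) : Prop := out = mirror_string_alt str
instance (str : String) (out : String) : Decidable (Spec_mirror_string str out) := by unfold Spec_mirror_string; infer_instance

-- ===== CLAIM (what is proved, stated in full; the proofs are below) =====
def Claim_equal_mirror_string : Prop := ∀ (str : String), Dom_mirror_string str → Spec_mirror_string str (mirror_string str)

-- ===== LEMMAS AND PROOFS =====

-- the per-character mirror, as A computes it
def mirChar (c : Char) : Char :=
  if 65 ≤ c.toNat ∧ c.toNat < 91 then Char.ofNat (90 - (c.toNat - 65))
  else if 97 ≤ c.toNat ∧ c.toNat < 123 then Char.ofNat (122 - (c.toNat - 97))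
  else c

-- A's loop body
def stepA (temp : List Char) (x : Int) : List Char :=
  let o := (PySem.List.pyGetD temp x ' ').toNat
  if 65 ≤ o ∧ o < 91 then PySem.List.pySetD temp x (Char.ofNat (90 - (o - 65)))
  else if 97 ≤ o ∧ o < 123 then PySem.List.pySetD temp x (Char.ofNat (122 - (o - 97)))
  else temp

lemma set_append_cons (pre : List Char) (c : Char) (rest : List Char) (v : Char) :
    (pre ++ c :: rest).set pre.length v = pre ++ v :: rest := by
  induction pre with
  | nil => rfl
  | cons p ps ih => simp [ih]

lemma getD_append_cons (pre : List Char) (c : Char) (rest : List Char) (d : Char) :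
    (pre ++ c :: rest).getD pre.length d = c := by
  simp [List.getD]

lemma stepA_at (pre : List Char) (c : Char) (rest : List Char) :
    stepA (pre ++ c :: rest) (pre.length : Int) = pre ++ mirChar c :: rest := by
  unfold stepA mirChar
  simp only [PySem.List.pyGetD_natCast, getD_append_cons, PySem.List.pySetD_natCast,
    set_append_cons]
  split_ifs <;> rfl

lemma loopA (post pre : List Char) :
    (PySem.List.pyRange (pre.length : Int) ((pre.length : Int) + (post.length : Int)) 1).foldl
      stepA (pre ++ post) = pre ++ post.map mirChar := by
  induction post generalizing pre with
  | nil => simp [PySem.List.pyRange_one_eq_nil]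
  | cons c rest ih =>
    rw [PySem.List.pyRange_one_cons (by simp only [List.length_cons]; push_cast; omega)]
    simp only [List.foldl_cons, stepA_at]
    have h2 : ((pre.length : Int) + 1) = (((pre ++ [mirChar c]).length : Int)) := by
      simp only [List.length_append, List.length_cons, List.length_nil]; push_cast; omega
    have h3 : ((pre.length : Int) + ((c :: rest).length : Int))
        = (((pre ++ [mirChar c]).length : Int)) + (rest.length : Int) := by
      simp only [List.length_append, List.length_cons, List.length_nil]; push_cast; omega
    rw [h2, h3]
    have := ih (pre ++ [mirChar c])
    simpa using this

lemma A_eq_map (str : String) :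
    mirror_string str = String.ofList (str.toList.map mirChar) := by
  unfold mirror_string
  have h := loopA str.toList []
  simp only [List.nil_append, List.length_nil, Int.natCast_zero, zero_add] at h
  simp only [PySem.List.len_eq]
  exact congrArg String.ofList h

-- B's maketrans table, evaluated once to its 52-pair literal
def tableLit : PySem.Dict Char Char := PySem.Dict.mk [('A', 'Z'), ('B', 'Y'), ('C', 'X'), ('D', 'W'), ('E', 'V'), ('F', 'U'), ('G', 'T'), ('H', 'S'), ('I', 'R'), ('J', 'Q'), ('K', 'P'), ('L', 'O'), ('M', 'N'), ('N', 'M'), ('O', 'L'), ('P', 'K'), ('Q', 'J'), ('R', 'I'), ('S', 'H'), ('T', 'G'), ('U', 'F'), ('V', 'E'), ('W', 'D'), ('X', 'C'), ('Y', 'B'), ('Z', 'A'), ('a', 'z'), ('b', 'y'), ('c', 'x'), ('d', 'w'), ('e', 'v'), ('f', 'u'), ('g', 't'), ('h', 's'), ('i', 'r'), ('j', 'q'), ('k', 'p'), ('l', 'o'), ('m', 'n'), ('n', 'm'), ('o', 'l'), ('p', 'k'), ('q', 'j'), ('r', 'i'), ('s', 'h'), ('t', 'g'), ('u', 'f'),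 ('v', 'e'), ('w', 'd'), ('x', 'c'), ('y', 'b'), ('z', 'a')]

set_option maxRecDepth 1000000 in
lemma table_eq :
    pyMaketrans "ABCDEFGHIJKLMNOPQRSTUVWXYZabcdefghijklmnopqrstuvwxyz".toList
      ((((PySem.List.slice? (PySem.List.slice "ABCDEFGHIJKLMNOPQRSTUVWXYZabcdefghijklmnopqrstuvwxyz".toList none (some 26)) none none (-1)).getD [])
        ++ ((PySem.List.slice? (PySem.List.slice "ABCDEFGHIJKLMNOPQRSTUVWXYZabcdefghijklmnopqrstuvwxyz".toList (some 26) none) none none (-1)).getD [])))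
    = tableLit := by decide

-- the table agrees with A's per-character mirror on every ASCII character
set_option maxRecDepth 20000 in
lemma table_spec : ∀ n : Nat, n < 127 →
    tableLit.getD (Char.ofNat n) (Char.ofNat n) = mirChar (Char.ofNat n) := by decide

-- ===== VERDICT (by name: the statement is the Claim_ definition above) =====
theorem mirror_string_spec : Claim_equal_mirror_string := by
  intro str hdom
  unfold Spec_mirror_string mirror_string_alt
  simp only [table_eq, pyTranslate]
  refine (A_eq_map str).trans ?_
  refine congrArg String.ofList ?_
  apply List.map_congr_left
  intro c hc
  have hd : pvDomChar c = true := (List.all_eq_true.mp hdom) c hc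
  have hn : c.toNat < 127 := by
    unfold pvDomChar at hd
    simp only [Bool.or_eq_true, Bool.and_eq_true, decide_eq_true_eq, beq_iff_eq] at hd
    omega
  have hofn : Char.ofNat c.toNat = c := Char.ofNat_toNat c
  have h2 := table_spec c.toNat hn
  rw [hofn] at h2
  exact h2.symm
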